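-- pv_equiv track=rewrite | github.com/andreakiro/cil-lab | models/neurals/src/helpers/io.py | cil_dict
-- ===== SOURCE A (Python) =====
-- def cil_dict(dictionary):
--     newdictionary = dict()
--     for user in dictionary:
--         for item, rating in dictionary[user]:
--             if item not in newdictionary:
--                 newdictionary[item] = []
--             newdictionary[item].append((user, rating))
--
--     for item in newdictionary:
--         newdictionary[item] = sorted(newdictionary[item])
--     # sort by item, then by user, as in the original csv
--
--     return dict(sorted(newdictionary.items()))
-- ===== SOURCE B (Python) =====
-- def cil_dict(dictionary):
--     # Flatten into (item, user, rating) triples, then build each item's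
--     # sorted user list directly from the flat list; no intermediate dict.
--     triples = [(item, user, rating)
--                for user, pairs in dictionary.items()
--                for item, rating in pairs]
--     items = sorted({item for item, _, _ in triples})
--     return {item: sorted((user, rating) for it, user, rating in triples if it == item)
--             for item in items}
-- ===== Notes on version B (the rewrite author's own statement) =====
-- stated objective: alternative
-- what changed: Instead of A's dict accumulation with per-bucket sorts plus a final sort of the whole dict, B flattens the input once into (item, user, rating) triples, takes the sorted distinct item list, and builds each item's value by filtering the flat list and sorting it.
import Mathlib
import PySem

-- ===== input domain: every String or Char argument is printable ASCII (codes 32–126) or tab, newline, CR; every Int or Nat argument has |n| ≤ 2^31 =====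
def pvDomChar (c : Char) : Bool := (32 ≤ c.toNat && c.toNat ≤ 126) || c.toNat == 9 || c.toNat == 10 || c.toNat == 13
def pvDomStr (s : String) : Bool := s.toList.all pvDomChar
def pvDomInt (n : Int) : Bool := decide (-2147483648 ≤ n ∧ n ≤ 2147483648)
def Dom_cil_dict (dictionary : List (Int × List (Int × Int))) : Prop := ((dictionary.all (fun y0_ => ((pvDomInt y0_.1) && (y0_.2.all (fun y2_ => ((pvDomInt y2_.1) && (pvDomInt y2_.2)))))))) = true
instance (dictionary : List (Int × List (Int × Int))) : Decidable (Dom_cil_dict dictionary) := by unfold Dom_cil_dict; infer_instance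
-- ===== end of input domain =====

-- B replaces A's dict accumulation + per-bucket sort + final key sort by one flat
-- triple list, a sorted distinct-item list, and a filter-and-sort per item (alternative decomposition).

-- ===== PORT A =====
def cil_dict (dictionary : List (Int × List (Int × Int))) : List (Int × List (Int × Int)) :=
  -- for user in dictionary: for item, rating in dictionary[user]: …
  -- (the input is a Python dict, so iterating its keys and indexing d[user]
  --  walks the (key, value) pairs in insertion order)
  let newdictionary : PySem.Dict Int (List (Int × Int)) :=
    dictionary.foldl (fun d up =>
      up.2.foldl (fun d ir =>
        let d1 := if d.contains ir.1 then d else d.insert ir.1 []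
        d1.insert ir.1 (d1.getD ir.1 [] ++ [(up.1, ir.2)])) d)
      PySem.Dict.empty
  -- for item in newdictionary: newdictionary[item] = sorted(newdictionary[item])
  -- (overwrite keeps position, so replacing every value in place maps over items)
  let newdictionary2 : PySem.Dict Int (List (Int × Int)) :=
    PySem.Dict.mk (newdictionary.items.map (fun kv =>
      (kv.1, PySem.List.sorted2 kv.2 (·.1) (·.2) false)))
  -- dict(sorted(newdictionary.items())): dict keys are distinct, so Python's tuple
  -- comparison never reaches the second (list) component — sorting by the key is exact
  PySem.List.sorted newdictionary2.items (·.1) false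

-- ===== PORT B =====
def cil_dict_alt (dictionary : List (Int × List (Int × Int))) : List (Int × List (Int × Int)) :=
  let triples : List (Int × Int × Int) :=
    dictionary.flatMap (fun up => up.2.map (fun ir => (ir.1, up.1, ir.2)))
  let items := PySem.List.sorted (PySem.Set.ofList (triples.map (·.1))) (fun x => x) false
  items.map (fun it =>
    (it, PySem.List.sorted2 ((triples.filter (fun t => t.1 == it)).map (·.2)) (·.1) (·.2) false))

-- ===== PRECONDITION & SPEC =====
def Spec_cil_dict (dictionary : List (Int × List (Int × Int))) (out : List (Int × List (Int × Int))) : Prop := out = cil_dict_alt dictionary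
instance (dictionary : List (Int × List (Int × Int))) (out : List (Int × List (Int × Int))) : Decidable (Spec_cil_dict dictionary out) := by unfold Spec_cil_dict; infer_instance

-- ===== CLAIM (what is proved, stated in full; the proofs are below) =====
def Claim_equal_cil_dict : Prop := ∀ (dictionary : List (Int × List (Int × Int))), Dom_cil_dict dictionary → Spec_cil_dict dictionary (cil_dict dictionary)

-- ===== LEMMAS AND PROOFS =====

-- A's loop body ("setdefault to [] then append") is Dict.modify with default []
theorem step_eq_modify (d : PySem.Dict Int (List (Int × Int))) (i : Int) (p : Int × Int) :
    (let d1 := if d.contains i then d else d.insert i ([] : List (Int × Int))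
     d1.insert i (d1.getD i [] ++ [p])) = d.modify i [] (· ++ [p]) := by
  by_cases h : d.contains i = true
  · simp [h, PySem.Dict.modify, PySem.Dict.getD_eq_get?_getD]
  · simp only [Bool.not_eq_true] at h
    simp [h, PySem.Dict.modify, PySem.Dict.getD_insert_self,
      PySem.Dict.insert_insert_self, PySem.Dict.getD_of_not_contains d [] h]

-- A's double loop is the single fold of the modify step over the flattened triples
theorem fold_eq_triples (dictionary : List (Int × List (Int × Int)))
    (e : PySem.Dict Int (List (Int × Int))) :
    dictionary.foldl (fun d up =>
      up.2.foldl (fun d ir =>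
        let d1 := if d.contains ir.1 then d else d.insert ir.1 []
        d1.insert ir.1 (d1.getD ir.1 [] ++ [(up.1, ir.2)])) d) e
    = (dictionary.flatMap (fun up => up.2.map (fun ir => (ir.1, up.1, ir.2)))).foldl
        (fun d t => d.modify t.1 [] (· ++ [t.2])) e := by
  rw [List.flatMap_def, List.foldl_flatten, List.foldl_map]
  refine PySem.List.foldl_congr_mem _ _ _ _ (fun d up _ => ?_)
  rw [List.foldl_map]
  exact PySem.List.foldl_congr_mem _ _ _ _ (fun d ir _ => step_eq_modify d ir.1 (up.1, ir.2))

-- sorting the items of a map k ↦ (k, g k) over a set by the key = mapping over the sorted set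
theorem sorted_map_graph (xs : List Int) (g : Int → List (Int × Int)) :
    PySem.List.sorted ((PySem.Set.ofList xs).map (fun k => (k, g k))) (·.1) false
    = (PySem.List.sorted (PySem.Set.ofList xs) (fun x => x) false).map (fun k => (k, g k)) := by
  apply PySem.List.sorted_eq_of_perm_of_pairwise_lt
  · exact (PySem.List.sorted_perm _ _ _).map _
  · exact List.Pairwise.map _ (fun a b h => h) (PySem.List.sorted_ofList_pairwise_lt xs)

-- ===== VERDICT (by name: the statement is the Claim_ definition above) =====
theorem cil_dict_spec : Claim_equal_cil_dict := by
  intro dictionary _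
  show cil_dict dictionary = cil_dict_alt dictionary
  unfold cil_dict cil_dict_alt
  dsimp only []
  rw [fold_eq_triples]
  set ts := dictionary.flatMap (fun up => up.2.map (fun ir => (ir.1, up.1, ir.2))) with hts
  set D := ts.foldl (fun d t => d.modify t.1 [] (· ++ [t.2])) PySem.Dict.empty with hD
  have hkeys : D.keys = PySem.Set.ofList (ts.map (·.1)) := by
    rw [hD, PySem.Dict.keys_foldl_modify_key ts (fun t => t.1) [] (fun _ t v => v ++ [t.2]) PySem.Dict.empty]
    simp [PySem.Set.update_nil_left]
  have hnd : D.keys.Nodup := by rw [hkeys]; exact PySem.Set.nodup_ofList _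
  have hgetD : ∀ k, D.getD k [] = (ts.filter (fun t => t.1 == k)).map (·.2) := by
    intro k
    rw [hD, PySem.Dict.getD_foldl_modify_append]
    simp
  rw [PySem.Dict.items_eq_map_keys D hnd [], hkeys]
  simp only [List.map_map, Function.comp_def]
  have : (fun k => ((k, PySem.List.sorted2 (D.getD k []) (·.1) (·.2) false) : Int × List (Int × Int)))
       = fun k => (k, PySem.List.sorted2 ((ts.filter (fun t => t.1 == k)).map (·.2)) (·.1) (·.2) false) := by
    funext k; rw [hgetD k]
  rw [this, sorted_map_graph]
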